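-- pv_equiv track=rewrite | github.com/pypi-data/pypi-mirror-280 | packages/pr-assistant-pkg/pr_assistant_pkg-0.1.0.tar.gz/pr_assistant_pkg-0.1.0/pr_assistant_pkg/__init__.py | parse_review_list_and_email
-- ===== SOURCE A (Python) =====
-- def parse_review_list_and_email(text):
--     lines = text.split('\n')
--     reviews = {}
--     emails = {}
--     current_member = None
--     email_body = []
--     email_mode = False
--
--     for line in lines:
--         line = line.strip()
--
--         # Identify the start of an email
--         if line.startswith("Dear "):
--             if current_member and email_body:
--                 emails[current_member] = '\n'.join(email_body)
--             current_member = line.split()[1].rstrip(',')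
--             email_body = [line]
--             email_mode = True
--
--         # Handle review assignments
--         elif line.startswith("- Review:") or line.startswith("Please review"):
--             email_body.append(line)
--
--         # Handle the list of people to review
--         elif line and not line.startswith("###") and not email_mode:
--             if ":" in line:
--                 member, review_list = line.split(':')
--                 member = member.strip()
--                 review_list = [review.strip() for review in review_list.split(',')]
--                 reviews[member] = review_list
--
--         # Collect email body
--         elif email_mode:
--             email_body.append(line)
--
--     # Add the last email to the emails dictionary
--     if current_member and email_body:
--         emails[current_member] = '\n'.join(email_body)
--
--     return reviews, emails
-- ===== SOURCE B (Python) =====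
-- def parse_review_list_and_email(text):
--     lines = [ln.strip() for ln in text.split('\n')]
--     first = next((i for i, ln in enumerate(lines) if ln.startswith("Dear ")), len(lines))
--
--     reviews = {}
--     for ln in lines[:first]:
--         if (not ln or ln.startswith("###") or ln.startswith("- Review:")
--                 or ln.startswith("Please review")):
--             continue
--         parts = ln.split(':')
--         if len(parts) == 2:
--             member, review_list = parts
--             reviews[member.strip()] = [r.strip() for r in review_list.split(',')]
--
--     emails = {}
--     i, n = first, len(lines)
--     while i < n:
--         j = i + 1
--         while j < n and not lines[j].startswith("Dear "):
--             j += 1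
--         member = lines[i].split()[1].rstrip(',')
--         if member:
--             emails[member] = '\n'.join(lines[i:j])
--         i = j
--     return reviews, emails
-- ===== Notes on version B (the rewrite author's own statement) =====
-- stated objective: alternative
-- what changed: A is one stateful loop with email_mode/current_member/email_body flags; B first locates the first 'Dear ' line, parses the review dict in one pass over the lines before it, then builds each email by scanning block-wise from one 'Dear ' line to the next and joining the block.
import Mathlib
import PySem

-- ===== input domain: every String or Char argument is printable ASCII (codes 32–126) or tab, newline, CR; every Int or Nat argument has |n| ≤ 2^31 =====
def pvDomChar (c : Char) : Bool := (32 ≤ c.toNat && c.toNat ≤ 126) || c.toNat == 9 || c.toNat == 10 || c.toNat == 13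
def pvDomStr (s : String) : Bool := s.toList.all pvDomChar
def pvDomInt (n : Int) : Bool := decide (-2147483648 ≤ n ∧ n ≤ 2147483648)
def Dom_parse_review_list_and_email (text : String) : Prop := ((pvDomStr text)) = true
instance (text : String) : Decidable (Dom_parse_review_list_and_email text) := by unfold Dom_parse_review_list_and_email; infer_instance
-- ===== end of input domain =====

-- B re-decomposes A's single stateful loop into: find the first 'Dear ' line, one pass for the
-- review dict over the lines before it, then a block-wise scan for the emails.  Return values only
-- (neither program mutates its argument); equal on Pre_ (where A does not raise ValueError).

-- shared primitive-level helpers (both Pythons contain the same two expressions verbatim)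

-- s.rstrip(',') : hand port (PySem has no one-sided char strip); exact: drops every trailing ','.
def pvRstripComma (s : String) : String := String.ofList ((s.toList.reverse.dropWhile (fun c => c == ',')).reverse)

-- line.split()[1].rstrip(',') : the [1] via pyGet?; the .getD "" default is unreachable at every
-- call site (a stripped line starting with "Dear " always has a second whitespace token).
def pvMemb (line : String) : String := pvRstripComma ((PySem.List.pyGet? (PySem.Str.split₀ line) 1).getD "")

-- ===== PORT A =====
-- loop state: (reviews, emails, current_member, email_body, email_mode); current_member None ∨ ""
-- (both falsy, only compared for truthiness / used as key when truthy) is modelled as "".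
def pvStepA (st : (PySem.Dict String (List String)) × (PySem.Dict String String) × String × List String × Bool)
    (l : String) : (PySem.Dict String (List String)) × (PySem.Dict String String) × String × List String × Bool :=
  let r := st.1; let e := st.2.1; let cm := st.2.2.1; let body := st.2.2.2.1; let mode := st.2.2.2.2
  let line := PySem.Str.strip l
  if PySem.Str.startswith line "Dear " = true then
    let e' := if cm ≠ "" ∧ body ≠ [] then e.insert cm (PySem.Str.join "\n" body) else e
    (r, e', pvMemb line, [line], true)
  else if PySem.Str.startswith line "- Review:" = true ∨ PySem.Str.startswith line "Please review" = true then
    (r, e, cm, body ++ [line], mode)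
  else if line ≠ "" ∧ PySem.Str.startswith line "###" = false ∧ mode = false then
    if PySem.Str.isIn ":" line = true then
      match (PySem.Str.split? line ":").getD [] with
      | [m, rl] => (r.insert (PySem.Str.strip m) (((PySem.Str.split? rl ",").getD []).map PySem.Str.strip), e, cm, body, mode)
      | _ => (r, e, cm, body, mode)   -- Python raises ValueError here (≠ 2 parts); excluded by Pre_
    else (r, e, cm, body, mode)
  else if mode = true then (r, e, cm, body ++ [line], mode)
  else (r, e, cm, body, mode)

def parse_review_list_and_email (text : String) : (List (String × List String)) × (List (String × String)) :=
  let lines := (PySem.Str.split? text "\n").getD []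
  let st := lines.foldl pvStepA (PySem.Dict.empty, PySem.Dict.empty, "", [], false)
  let e' := if st.2.2.1 ≠ "" ∧ st.2.2.2.1 ≠ [] then st.2.1.insert st.2.2.1 (PySem.Str.join "\n" st.2.2.2.1) else st.2.1
  (st.1.items, e'.items)

-- ===== PORT B =====
def pvRevStepB (r : PySem.Dict String (List String)) (ln : String) : PySem.Dict String (List String) :=
  if ln = "" ∨ PySem.Str.startswith ln "###" = true ∨ PySem.Str.startswith ln "- Review:" = true
      ∨ PySem.Str.startswith ln "Please review" = true then r
  else
    match (PySem.Str.split? ln ":").getD [] with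
    | [m, rl] => r.insert (PySem.Str.strip m) (((PySem.Str.split? rl ",").getD []).map PySem.Str.strip)
    | _ => r

-- the while-loop over i/j: head is a 'Dear ' line, j scans to the next 'Dear ' line (takeWhile /
-- dropWhile), then recurse from there.
-- fuel only makes the recursion structural (kernel-reducible); the top call passes the list's
-- length, which the scan never exceeds, so the fuel-0 case is unreachable.
def pvEmailsBgo (fuel : Nat) (e : PySem.Dict String String) (ls : List String) : PySem.Dict String String :=
  match fuel, ls with
  | _, [] => e
  | 0, _ => e
  | fuel + 1, h :: t =>
      let body := t.takeWhile (fun l => !PySem.Str.startswith l "Dear ")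
      let rest := t.dropWhile (fun l => !PySem.Str.startswith l "Dear ")
      let m := pvMemb h
      pvEmailsBgo fuel (if m ≠ "" then e.insert m (PySem.Str.join "\n" (h :: body)) else e) rest

def pvEmailsB (e : PySem.Dict String String) (ls : List String) : PySem.Dict String String :=
  pvEmailsBgo ls.length e ls

def parse_review_list_and_email_alt (text : String) : (List (String × List String)) × (List (String × String)) :=
  let lines := ((PySem.Str.split? text "\n").getD []).map PySem.Str.strip
  let first := lines.findIdx (fun l => PySem.Str.startswith l "Dear ")
  let r := (lines.take first).foldl pvRevStepB PySem.Dict.empty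
  let e := pvEmailsB PySem.Dict.empty (lines.drop first)
  (r.items, e.items)

-- ===== PRECONDITION & SPEC =====
-- A raises ValueError exactly when some stripped line before the first 'Dear ' line is nonempty,
-- not '###'/'- Review:'/'Please review', and contains two or more ':'; Pre_ excludes those texts.
def Pre_parse_review_list_and_email (text : String) : Prop :=
  ∀ l ∈ (((PySem.Str.split? text "\n").getD []).map PySem.Str.strip).takeWhile
      (fun l => !PySem.Str.startswith l "Dear "),
    l ≠ "" → PySem.Str.startswith l "###" = false → PySem.Str.startswith l "- Review:" = false →
    PySem.Str.startswith l "Please review" = false → PySem.Str.count l ":" ≤ 1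
instance (text : String) : Decidable (Pre_parse_review_list_and_email text) := by
  unfold Pre_parse_review_list_and_email; infer_instance

def pvWitness_parse_review_list_and_email : String := "alice: bob, carl\nDear bob,\nhi\nDear carl,\nyo"

def Spec_parse_review_list_and_email (text : String) (out : (List (String × List String)) × (List (String × String))) : Prop := out = parse_review_list_and_email_alt text
instance (text : String) (out : (List (String × List String)) × (List (String × String))) : Decidable (Spec_parse_review_list_and_email text out) := by unfold Spec_parse_review_list_and_email; infer_instance

-- ===== CLAIM (what is proved, stated in full; the proofs are below) =====
def Claim_equal_parse_review_list_and_email : Prop := ∀ (text : String), Dom_parse_review_list_and_email text → Pre_parse_review_list_and_email text → Spec_parse_review_list_and_email text (parse_review_list_and_email text)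

-- ===== LEMMAS AND PROOFS =====

-- abbreviations used only by the proofs
def pvIsDear (s : String) : Bool := PySem.Str.startswith s "Dear "
def pvIsRev (s : String) : Bool := PySem.Str.startswith s "- Review:" || PySem.Str.startswith s "Please review"

-- no ':' in s → s.split(':') = [s]
theorem pv_go_no_occur (sep : List Char) (fuel : Nat) :
    ∀ (l cur : List Char) (acc : List (List Char)), l.length < fuel → ¬ sep <:+: l →
      PySem.Chars.splitOn.go sep fuel l cur acc = ((cur.reverse ++ l) :: acc).reverse := by
  induction fuel with
  | zero => intro l cur acc h; omega
  | succ n ih =>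
    intro l cur acc hlen hinf
    cases l with
    | nil => simp [PySem.Chars.splitOn.go]
    | cons c rest =>
      rw [PySem.Chars.splitOn.go]
      have hp : sep.isPrefixOf (c :: rest) = false := by
        by_contra h
        exact hinf ((List.isPrefixOf_iff_prefix.mp (by simpa using h)).isInfix)
      rw [hp]
      simp only [Bool.false_eq_true, if_false]
      have : PySem.Chars.splitOn.go sep n rest (c :: cur) acc = (((c :: cur).reverse ++ rest) :: acc).reverse := by
        apply ih
        · simpa using Nat.lt_of_succ_lt_succ hlen
        · intro h; exact hinf (h.trans (List.suffix_cons c rest).isInfix)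
      rw [this]; simp

theorem pv_noColon (s : String) (h : PySem.Str.isIn ":" s = false) :
    (PySem.Str.split? s ":").getD [] = [s] := by
  have h2 : ¬ (":".toList <:+: s.toList) := by
    simpa using (PySem.Chars.isIn_eq_false_iff _ _).mp (by simpa using h)
  rw [PySem.Str.split?]
  simp only [PySem.Chars.split?, PySem.Chars.splitOn]
  rw [pv_go_no_occur ":".toList (s.toList.length + 1) s.toList [] [] (by omega) h2]
  simp [String.ofList_toList]

-- open-block email builder: A's email phase, expressed block-recursively
def pvOpenB (e : PySem.Dict String String) (cm : String) (body : List String) :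
    List String → PySem.Dict String String
  | [] => if cm ≠ "" then e.insert cm (PySem.Str.join "\n" body) else e
  | l :: t =>
      let s := PySem.Str.strip l
      if pvIsDear s = true then
        pvOpenB (if cm ≠ "" then e.insert cm (PySem.Str.join "\n" body) else e) (pvMemb s) [s] t
      else pvOpenB e cm (body ++ [s]) t

-- one pre-phase step: outside email mode, on a non-'Dear ' line, A performs exactly B's
-- review step and appends the line to the (dead) body iff it is a '- Review:'/'Please review' line
set_option maxHeartbeats 2000000 in
theorem pv_step_pre (r : PySem.Dict String (List String)) (e : PySem.Dict String String)
    (body : List String) (l : String) (hd : pvIsDear (PySem.Str.strip l) = false) :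
    pvStepA (r, e, "", body, false) l =
      (pvRevStepB r (PySem.Str.strip l), e, "",
       body ++ (if pvIsRev (PySem.Str.strip l) = true then [PySem.Str.strip l] else []), false) := by
  simp only [pvIsDear] at hd
  by_cases h1 : PySem.Str.startswith (PySem.Str.strip l) "- Review:" = true
  · simp_all [pvStepA, pvRevStepB, pvIsRev]
  by_cases h2 : PySem.Str.startswith (PySem.Str.strip l) "Please review" = true
  · simp_all [pvStepA, pvRevStepB, pvIsRev]
  by_cases h3 : PySem.Str.strip l = ""
  · simp_all [pvStepA, pvRevStepB, pvIsRev]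
  by_cases h4 : PySem.Str.startswith (PySem.Str.strip l) "###" = true
  · simp_all [pvStepA, pvRevStepB, pvIsRev]
  have e1 : PySem.Str.startswith (PySem.Str.strip l) "- Review:" = false := Bool.eq_false_iff.mpr h1
  have e2 : PySem.Str.startswith (PySem.Str.strip l) "Please review" = false := Bool.eq_false_iff.mpr h2
  have e4 : PySem.Str.startswith (PySem.Str.strip l) "###" = false := Bool.eq_false_iff.mpr h4
  simp only [pvStepA, pvRevStepB, pvIsRev]
  by_cases h5 : PySem.Str.isIn ":" (PySem.Str.strip l) = true
  · generalize hps : (PySem.Str.split? (PySem.Str.strip l) ":").getD [] = ps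
    rcases ps with _ | ⟨m, _ | ⟨rl, _ | _⟩⟩ <;> simp_all
  · have e5 : PySem.Str.isIn ":" (PySem.Str.strip l) = false := Bool.eq_false_iff.mpr h5
    rw [pv_noColon _ e5]
    simp_all

-- phase 1: while email_mode is off and no 'Dear ' line has been seen, A only builds the review
-- dict (with B's per-line step) and appends '- Review:'/'Please review' lines to the dead body.
set_option maxHeartbeats 2000000 in
theorem pv_phase1 (ls : List String) :
    ∀ (r : PySem.Dict String (List String)) (e : PySem.Dict String String) (body : List String),
      (∀ l ∈ ls, pvIsDear (PySem.Str.strip l) = false) →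
      ls.foldl pvStepA (r, e, "", body, false) =
        ((ls.map PySem.Str.strip).foldl pvRevStepB r, e, "",
         body ++ (ls.map PySem.Str.strip).filter pvIsRev, false) := by
  induction ls with
  | nil => intro r e body h; simp
  | cons l t ih =>
    intro r e body h
    have hd : pvIsDear (PySem.Str.strip l) = false := h l (by simp)
    simp only [List.foldl_cons, List.map_cons, List.filter_cons,
      pv_step_pre r e body l hd]
    rw [ih _ _ _ (fun x hx => h x (by simp [hx]))]
    by_cases hr : pvIsRev (PySem.Str.strip l) = true <;> simp [hr]

-- in email mode every non-'Dear ' line is appended to the body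
set_option maxHeartbeats 2000000 in
theorem pv_step_mode (r : PySem.Dict String (List String)) (e : PySem.Dict String String)
    (cm : String) (body : List String) (l : String) :
    pvStepA (r, e, cm, body, true) l =
      if pvIsDear (PySem.Str.strip l) = true then
        (r, (if cm ≠ "" ∧ body ≠ [] then e.insert cm (PySem.Str.join "\n" body) else e),
         pvMemb (PySem.Str.strip l), [PySem.Str.strip l], true)
      else (r, e, cm, body ++ [PySem.Str.strip l], true) := by
  simp only [pvStepA, pvIsDear]
  by_cases h1 : PySem.Str.startswith (PySem.Str.strip l) "Dear " = true
  · simp [h1]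
  · simp only [h1, Bool.false_eq_true, if_false]
    by_cases h2 : (PySem.Str.startswith (PySem.Str.strip l) "- Review:" = true ∨
        PySem.Str.startswith (PySem.Str.strip l) "Please review" = true)
    · simp [h2]
    · simp [h2]

-- phase 2: A's email-mode fold plus the final flush equals the open-block builder
set_option maxHeartbeats 2000000 in
theorem pv_phase2 (ls : List String) :
    ∀ (r : PySem.Dict String (List String)) (e : PySem.Dict String String)
      (cm : String) (body : List String), body ≠ [] →
      (let st := ls.foldl pvStepA (r, e, cm, body, true)
       (st.1, if st.2.2.1 ≠ "" ∧ st.2.2.2.1 ≠ [] then st.2.1.insert st.2.2.1 (PySem.Str.join "\n" st.2.2.2.1) else st.2.1)) =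
      (r, pvOpenB e cm body ls) := by
  induction ls with
  | nil =>
    intro r e cm body hb
    by_cases hc : cm = "" <;> simp [pvOpenB, hc, hb]
  | cons l t ih =>
    intro r e cm body hb
    simp only [List.foldl_cons, pv_step_mode, pvOpenB]
    by_cases hd : pvIsDear (PySem.Str.strip l) = true
    · simp only [hd, if_true]
      rw [ih _ _ _ _ (by simp)]
      by_cases hc : cm = "" <;> simp [hc, hb]
    · simp only [hd, Bool.false_eq_true, if_false]
      exact ih _ _ _ _ (by simp)

-- the open-block builder is B's block scanner
theorem pvEmailsBgo_nil (fuel : Nat) (e : PySem.Dict String String) :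
    pvEmailsBgo fuel e [] = e := by cases fuel <;> rfl

theorem pvEmailsBgo_cons (fuel : Nat) (e : PySem.Dict String String) (h : String) (t : List String) :
    pvEmailsBgo (fuel + 1) e (h :: t) =
      pvEmailsBgo fuel
        (if pvMemb h ≠ "" then
            e.insert (pvMemb h) (PySem.Str.join "\n"
              (h :: t.takeWhile (fun l => !PySem.Str.startswith l "Dear ")))
          else e)
        (t.dropWhile (fun l => !PySem.Str.startswith l "Dear ")) := rfl

set_option maxHeartbeats 2000000 in
theorem pv_open_eq (t : List String) :
    ∀ (e : PySem.Dict String String) (m : String) (body : List String) (fuel : Nat), t.length ≤ fuel →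
      pvOpenB e m body t =
        pvEmailsBgo fuel
          (if m ≠ "" then e.insert m (PySem.Str.join "\n"
              (body ++ (t.map PySem.Str.strip).takeWhile (fun l => !PySem.Str.startswith l "Dear "))) else e)
          ((t.map PySem.Str.strip).dropWhile (fun l => !PySem.Str.startswith l "Dear ")) := by
  induction t with
  | nil =>
    intro e m body fuel hf
    simp [pvOpenB, pvEmailsBgo_nil]
  | cons l t ih =>
    intro e m body fuel hf
    simp only [pvOpenB, pvIsDear, List.map_cons, List.length_cons] at hf ⊢
    by_cases hd : PySem.Str.startswith (PySem.Str.strip l) "Dear " = true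
    · rw [if_pos hd]
      obtain ⟨k, rfl⟩ : ∃ k, fuel = k + 1 := ⟨fuel - 1, by omega⟩
      rw [List.takeWhile_cons_of_neg (by simp only [hd]; decide),
          List.dropWhile_cons_of_neg (by simp only [hd]; decide)]
      rw [pvEmailsBgo_cons, ih _ _ _ k (by omega)]
      simp only [List.singleton_append, List.append_nil]
    · rw [if_neg hd]
      rw [List.takeWhile_cons_of_pos (by simp only [Bool.eq_false_iff.mpr hd]; decide),
          List.dropWhile_cons_of_pos (by simp only [Bool.eq_false_iff.mpr hd]; decide)]
      rw [ih _ _ _ fuel (by omega)]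
      simp only [List.append_assoc, List.singleton_append]

-- generic list facts used by the assembly (not found under these forms in Mathlib)
theorem pv_take_findIdx {α : Type} (p : α → Bool) : ∀ ls : List α,
    ls.take (ls.findIdx p) = ls.takeWhile (fun x => !p x) := by
  intro ls
  induction ls with
  | nil => rfl
  | cons a l ih => cases h : p a <;> simp [List.findIdx_cons, h, ih]

theorem pv_drop_findIdx {α : Type} (p : α → Bool) : ∀ ls : List α,
    ls.drop (ls.findIdx p) = ls.dropWhile (fun x => !p x) := by
  intro ls
  induction ls with
  | nil => rfl
  | cons a l ih => cases h : p a <;> simp [List.findIdx_cons, h, ih]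

theorem pv_dropWhile_head {α : Type} (q : α → Bool) : ∀ (ls : List α) (d : α) (t : List α),
    ls.dropWhile q = d :: t → q d = false := by
  intro ls
  induction ls with
  | nil => intro d t h; simp at h
  | cons a l ih =>
    intro d t h
    by_cases ha : q a = true
    · rw [List.dropWhile_cons_of_pos ha] at h; exact ih _ _ h
    · rw [List.dropWhile_cons_of_neg ha] at h
      cases h; exact Bool.eq_false_iff.mpr ha

-- first 'Dear ' line, seen from the pre-phase state: email mode starts, nothing is flushed
theorem pv_step_dear0 (r : PySem.Dict String (List String)) (e : PySem.Dict String String)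
    (body : List String) (d : String) (hd : PySem.Str.startswith (PySem.Str.strip d) "Dear " = true) :
    pvStepA (r, e, "", body, false) d = (r, e, pvMemb (PySem.Str.strip d), [PySem.Str.strip d], true) := by
  simp only [pvStepA]
  rw [if_pos hd, if_neg (by simp)]

set_option maxHeartbeats 2000000 in
theorem pv_main (text : String) :
    parse_review_list_and_email text = parse_review_list_and_email_alt text := by
  unfold parse_review_list_and_email parse_review_list_and_email_alt pvEmailsB
  dsimp only
  set ls := (PySem.Str.split? text "\n").getD [] with hls
  set p : String → Bool := fun l => PySem.Str.startswith l "Dear " with hp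
  set q : String → Bool := fun l => !p (PySem.Str.strip l) with hq
  have hBrev : (ls.map PySem.Str.strip).take ((ls.map PySem.Str.strip).findIdx p)
      = (ls.takeWhile q).map PySem.Str.strip := by
    rw [pv_take_findIdx, List.takeWhile_map]; rfl
  have hBdrop : (ls.map PySem.Str.strip).drop ((ls.map PySem.Str.strip).findIdx p)
      = (ls.dropWhile q).map PySem.Str.strip := by
    rw [pv_drop_findIdx, List.dropWhile_map]; rfl
  have hpre_mem : ∀ l ∈ ls.takeWhile q, pvIsDear (PySem.Str.strip l) = false := by
    intro l hl
    have h1 : q l = true := List.mem_takeWhile_imp hl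
    rw [hq] at h1
    simpa [pvIsDear, hp] using h1
  have hfold : ls.foldl pvStepA (PySem.Dict.empty, PySem.Dict.empty, "", [], false)
      = (ls.dropWhile q).foldl pvStepA
          (((ls.takeWhile q).map PySem.Str.strip).foldl pvRevStepB PySem.Dict.empty,
           PySem.Dict.empty, "",
           [] ++ ((ls.takeWhile q).map PySem.Str.strip).filter pvIsRev, false) := by
    conv_lhs => rw [← List.takeWhile_append_dropWhile (p := q) (l := ls)]
    rw [List.foldl_append, pv_phase1 _ _ _ _ hpre_mem]
  rw [hBrev, hBdrop, hfold]
  cases hrest : ls.dropWhile q with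
  | nil =>
    simp only [List.foldl_nil, List.map_nil, List.length_nil, pvEmailsBgo_nil]
    rw [if_neg (by simp)]
  | cons d t =>
    have hd : PySem.Str.startswith (PySem.Str.strip d) "Dear " = true := by
      have := pv_dropWhile_head q ls d t hrest
      rw [hq] at this
      simpa [hp] using this
    simp only [List.foldl_cons]
    rw [pv_step_dear0 _ _ _ _ hd]
    have h2 := pv_phase2 t (((ls.takeWhile q).map PySem.Str.strip).foldl pvRevStepB PySem.Dict.empty)
      PySem.Dict.empty (pvMemb (PySem.Str.strip d)) [PySem.Str.strip d] (by simp)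
    simp only at h2
    have hfst := congrArg Prod.fst h2
    have hsnd := congrArg Prod.snd h2
    simp only at hfst hsnd
    rw [hfst, hsnd]
    rw [pv_open_eq t _ _ _ t.length (le_refl _)]
    simp only [List.map_cons, List.length_cons]
    rw [pvEmailsBgo_cons]
    simp only [List.singleton_append, List.length_map]

-- ===== VERDICT (by name: the statement is the Claim_ definition above) =====
theorem parse_review_list_and_email_spec : Claim_equal_parse_review_list_and_email := by
  unfold Claim_equal_parse_review_list_and_email
  intro text _ _
  unfold Spec_parse_review_list_and_email
  exact pv_main text
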